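-- pv_equiv track=rewrite | github.com/drowolath/server | frontend/build.py | find_related
-- ===== SOURCE A (Python) =====
-- def find_related(trace: dict, all_traces: list[dict], limit: int = 5) -> list[dict]:
--     my_tags = set(trace["tags"])
--     scored = []
--     for other in all_traces:
--         if other["slug"] == trace["slug"]:
--             continue
--         overlap = len(my_tags & set(other["tags"]))
--         if overlap > 0:
--             scored.append((overlap, other))
--     scored.sort(key=lambda x: x[0], reverse=True)
--     return [t for _, t in scored[:limit]]
-- ===== SOURCE B (Python) =====
-- def find_related(trace: dict, all_traces: list[dict], limit: int = 5) -> list[dict]: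
--     my_tags = set(trace["tags"])
--
--     def overlap(other):
--         return len(my_tags & set(other["tags"]))
--
--     result = []
--     for k in range(len(my_tags), 0, -1):
--         result.extend(o for o in all_traces
--                       if o["slug"] != trace["slug"] and overlap(o) == k)
--     return result[:limit]
-- ===== Notes on version B (the rewrite author's own statement) =====
-- stated objective: alternative
-- what changed: Replaces collecting (overlap, trace) pairs and stable reverse-sorting them with staged passes: for each overlap count from len(my_tags) down to 1, a filter pass over all_traces collects the traces with exactly that overlap in input order, then the concatenation is truncated to limit.
import Mathlib
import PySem

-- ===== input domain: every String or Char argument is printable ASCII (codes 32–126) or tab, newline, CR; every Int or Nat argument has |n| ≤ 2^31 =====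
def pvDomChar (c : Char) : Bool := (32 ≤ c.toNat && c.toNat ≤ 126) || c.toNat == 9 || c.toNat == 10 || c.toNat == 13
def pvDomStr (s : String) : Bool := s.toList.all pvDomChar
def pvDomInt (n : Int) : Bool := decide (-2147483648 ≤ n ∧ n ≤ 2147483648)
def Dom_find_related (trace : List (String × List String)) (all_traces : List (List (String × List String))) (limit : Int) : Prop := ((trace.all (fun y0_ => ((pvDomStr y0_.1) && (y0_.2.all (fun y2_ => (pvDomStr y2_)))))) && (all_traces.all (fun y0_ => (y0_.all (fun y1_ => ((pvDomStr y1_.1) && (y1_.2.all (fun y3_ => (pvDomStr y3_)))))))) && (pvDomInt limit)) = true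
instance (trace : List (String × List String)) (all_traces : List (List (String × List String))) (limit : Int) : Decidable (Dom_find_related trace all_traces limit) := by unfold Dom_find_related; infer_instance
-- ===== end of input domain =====

-- B replaces A's collect-scored-pairs-then-stable-reverse-sort with staged filter passes, one per
-- overlap count from len(my_tags) down to 1 (same return value; objective: alternative, no sort).

-- ===== PORT A =====
def find_related (trace : List (String × List String)) (all_traces : List (List (String × List String))) (limit : Int) : List (List (String × List String)) :=
  let my_tags := PySem.Set.ofList ((PySem.Dict.mk trace).getD "tags" [])
  let scored := all_traces.foldl
    (fun scored other =>
      if (PySem.Dict.mk other).getD "slug" [] == (PySem.Dict.mk trace).getD "slug" [] then scored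
      else
        let overlap := PySem.Set.len (PySem.Set.inter my_tags (PySem.Set.ofList ((PySem.Dict.mk other).getD "tags" [])))
        if overlap > 0 then scored ++ [(overlap, other)] else scored)
    ([] : List (Int × List (String × List String)))
  (PySem.List.slice (PySem.List.sorted scored (fun x => x.1) true) none (some limit)).map (fun x => x.2)

-- ===== PORT B =====
def find_related_alt (trace : List (String × List String)) (all_traces : List (List (String × List String))) (limit : Int) : List (List (String × List String)) :=
  let my_tags := PySem.Set.ofList ((PySem.Dict.mk trace).getD "tags" [])
  let overlap := fun other =>
    PySem.Set.len (PySem.Set.inter my_tags (PySem.Set.ofList ((PySem.Dict.mk other).getD "tags" [])))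
  let result := (PySem.List.pyRange (PySem.Set.len my_tags) 0 (-1)).foldl
    (fun r k => r ++ all_traces.filter
      (fun o => !((PySem.Dict.mk o).getD "slug" [] == (PySem.Dict.mk trace).getD "slug" [])
                && overlap o == k)) []
  PySem.List.slice result none (some limit)

-- ===== PRECONDITION & SPEC =====
-- Pre_ is exactly where the Python A returns: A raises KeyError when trace lacks "tags", or when
-- some element of all_traces lacks "slug", or (once the loop body runs) trace lacks "slug", or an
-- element with a different slug lacks "tags".
def Pre_find_related (trace : List (String × List String)) (all_traces : List (List (String × List String))) (limit : Int) : Prop :=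
  (PySem.Dict.mk trace).contains "tags" = true ∧
  ∀ other ∈ all_traces,
    (PySem.Dict.mk other).contains "slug" = true ∧
    (PySem.Dict.mk trace).contains "slug" = true ∧
    ((PySem.Dict.mk other).get? "slug" = (PySem.Dict.mk trace).get? "slug" ∨
      (PySem.Dict.mk other).contains "tags" = true)
instance (trace : List (String × List String)) (all_traces : List (List (String × List String))) (limit : Int) : Decidable (Pre_find_related trace all_traces limit) := by unfold Pre_find_related; infer_instance

def pvWitness_find_related : (List (String × List String)) × (List (List (String × List String))) × Int :=
  ([("tags", ["a", "b"]), ("slug", ["t"])],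
   [[("slug", ["u"]), ("tags", ["b", "c"])], [("slug", ["v"]), ("tags", ["a", "b"])]],
   1)

def Spec_find_related (trace : List (String × List String)) (all_traces : List (List (String × List String))) (limit : Int) (out : List (List (String × List String))) : Prop := out = find_related_alt trace all_traces limit
instance (trace : List (String × List String)) (all_traces : List (List (String × List String))) (limit : Int) (out : List (List (String × List String))) : Decidable (Spec_find_related trace all_traces limit out) := by unfold Spec_find_related; infer_instance

-- ===== CLAIM (what is proved, stated in full; the proofs are below) =====
def Claim_equal_find_related : Prop := ∀ (trace : List (String × List String)) (all_traces : List (List (String × List String))) (limit : Int), Dom_find_related trace all_traces limit → Pre_find_related trace all_traces limit → Spec_find_related trace all_traces limit (find_related trace all_traces limit)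

-- ===== LEMMAS AND PROOFS =====

-- `map f` commutes with a stop-only Python slice.
theorem map_slice_stop {α β : Type} (f : α → β) (xs : List α) (b : Int) :
    (PySem.List.slice xs none (some b)).map f = PySem.List.slice (xs.map f) none (some b) := by
  simp [PySem.List.slice, List.map_take]

theorem insertBy_skip {α : Type} (before : α → α → Bool) (p : α) (A B : List α)
    (h : ∀ a ∈ A, before p a = false) :
    PySem.List.insertBy before p (A ++ B) = A ++ PySem.List.insertBy before p B := by
  induction A with
  | nil => simp
  | cons a A ih =>
    simp only [List.cons_append, PySem.List.insertBy, h a (by simp)]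
    simp only [Bool.false_eq_true, if_false, List.cons.injEq, true_and]
    exact ih (fun a ha => h a (by simp [ha]))

theorem insertBy_all_before {α : Type} (before : α → α → Bool) (p : α) (B : List α)
    (h : ∀ b ∈ B, before p b = true) :
    PySem.List.insertBy before p B = p :: B := by
  cases B with
  | nil => rfl
  | cons b B => simp [PySem.List.insertBy, h b (by simp)]

-- Inserting a pair with key in `ks` into the descending-bucket concatenation appends it
-- at the end of its own bucket.
theorem insertBy_flatMap_filter {β : Type} (ks : List Int) (xs : List (Int × β)) (p : Int × β)
    (hks : ks.Pairwise (· > ·)) (hp : p.1 ∈ ks) :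
    PySem.List.insertBy (fun a b => decide (b.1 < a.1)) p
        (ks.flatMap (fun j => xs.filter (fun q => q.1 == j)))
      = ks.flatMap (fun j => (xs ++ [p]).filter (fun q => q.1 == j)) := by
  induction ks with
  | nil => cases hp
  | cons j ks ih =>
    rcases List.pairwise_cons.mp hks with ⟨hgt, htail⟩
    by_cases hpj : p.1 = j
    · have htailnew : ks.flatMap (fun j => (xs ++ [p]).filter (fun q => q.1 == j))
          = ks.flatMap (fun j => xs.filter (fun q => q.1 == j)) := by
        refine List.flatMap_congr (fun j' hj' => ?_)
        have : ¬ (p.1 == j') = true := by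
          have := hgt j' hj'; simp only [beq_iff_eq]; omega
        simp [List.filter_append, this]
      simp only [List.flatMap_cons, htailnew]
      rw [insertBy_skip]
      · have : PySem.List.insertBy (fun a b => decide (b.1 < a.1)) p
            (ks.flatMap (fun j => xs.filter (fun q => q.1 == j)))
            = p :: ks.flatMap (fun j => xs.filter (fun q => q.1 == j)) := by
          refine insertBy_all_before _ _ _ (fun b hb => ?_)
          rcases List.mem_flatMap.mp hb with ⟨j', hj', hbmem⟩
          have hb1 : b.1 = j' := by
            have := (List.mem_filter.mp hbmem).2; simpa using this
          have := hgt j' hj'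
          simp only [decide_eq_true_eq]; omega
        rw [this]
        simp [List.filter_append, hpj]
      · intro a ha
        have ha1 : a.1 = j := by
          have := (List.mem_filter.mp ha).2; simpa using this
        simp only [decide_eq_false_iff_not]; omega
    · have hp' : p.1 ∈ ks := by cases hp with
        | head => exact absurd rfl hpj
        | tail _ h => exact h
      have hjlt : p.1 < j := hgt _ hp'
      simp only [List.flatMap_cons]
      have hfj : (xs ++ [p]).filter (fun q => q.1 == j) = xs.filter (fun q => q.1 == j) := by
        have : ¬ (p.1 == j) = true := by simpa using hpj
        simp [List.filter_append, this]
      rw [hfj, insertBy_skip, ih htail hp']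
      intro a ha
      have ha1 : a.1 = j := by
        have := (List.mem_filter.mp ha).2; simpa using this
      simp only [decide_eq_false_iff_not]; omega

-- Python's stable reverse sort by an Int key with all keys in (0, K] IS the descending-bucket readout.
theorem sorted_rev_eq_flatMap {β : Type} (K : Int) (xs : List (Int × β))
    (h : ∀ p ∈ xs, 0 < p.1 ∧ p.1 ≤ K) :
    PySem.List.sorted xs (fun p => p.1) true
      = (PySem.List.pyRange K 0 (-1)).flatMap (fun j => xs.filter (fun q => q.1 == j)) := by
  rw [PySem.List.sorted_rev_eq_foldl_insertBy]
  induction xs using List.reverseRecOn with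
  | nil => simp
  | append_singleton xs p ih =>
    rw [List.foldl_append]
    simp only [List.foldl_cons, List.foldl_nil]
    rw [ih (fun q hq => h q (by simp [hq]))]
    refine insertBy_flatMap_filter _ _ _ ?_ ?_
    · rw [PySem.List.pyRange_neg_one_eq_reverse]
      rw [List.pairwise_reverse]
      exact (PySem.List.pairwise_lt_pyRange_one _ _).imp (fun h => h)
    · have := h p (by simp)
      exact PySem.List.mem_pyRange_neg_one.mpr ⟨this.1, this.2⟩

-- A's scored accumulation is the filter of the input by "kept and positive overlap",
-- tagged with its overlap.
theorem fold_scored_eq {T : Type} (skip : T → Bool) (ov : T → Int) (l : List T)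
    (acc : List (Int × T)) :
    l.foldl (fun s other => if skip other then s
        else if ov other > 0 then s ++ [(ov other, other)] else s) acc
      = acc ++ (l.filter (fun o => !skip o && ov o > 0)).map (fun o => (ov o, o)) := by
  induction l generalizing acc with
  | nil => simp
  | cons o l ih =>
    simp only [List.foldl_cons, List.filter_cons]
    by_cases hs : skip o
    · simp [hs, ih]
    · by_cases hov : ov o > 0
      · simp [hs, hov, ih]
      · simp [hs, hov, ih]

-- End-to-end: A's sort-then-slice equals B's staged filter passes, for any skip test and any
-- scoring function bounded by K.
theorem generic_equiv {T : Type} [DecidableEq T] (skip : T → Bool) (ov : T → Int) (K : Int)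
    (hK : ∀ o : T, ov o ≤ K) (l : List T) (limit : Int) :
    (PySem.List.slice (PySem.List.sorted (l.foldl (fun s other => if skip other then s
          else if ov other > 0 then s ++ [(ov other, other)] else s) [])
        (fun x => x.1) true) none (some limit)).map (fun x => x.2)
      = PySem.List.slice ((PySem.List.pyRange K 0 (-1)).foldl
          (fun r k => r ++ l.filter (fun o => !skip o && ov o == k)) []) none (some limit) := by
  rw [map_slice_stop]
  congr 1
  rw [PySem.List.foldl_append_eq_flatMap, List.nil_append, fold_scored_eq]
  rw [List.nil_append]
  rw [sorted_rev_eq_flatMap K _ (by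
    intro p hp
    rcases List.mem_map.mp hp with ⟨o, ho, rfl⟩
    have := (List.mem_filter.mp ho).2
    simp only [Bool.and_eq_true, decide_eq_true_eq] at this
    exact ⟨this.2, hK o⟩)]
  rw [List.map_flatMap]
  refine List.flatMap_congr (fun j hj => ?_)
  have hjpos : 0 < j := (PySem.List.mem_pyRange_neg_one.mp hj).1
  rw [List.filter_map, List.map_map]
  have : (l.filter (fun o => !skip o && ov o > 0)).filter (fun o => ov o == j)
      = l.filter (fun o => !skip o && ov o == j) := by
    rw [List.filter_filter]
    refine List.filter_congr (fun o _ => ?_)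
    by_cases h : ov o = j
    · simp [h, hjpos]
    · have : ¬ (ov o == j) = true := by simpa using h
      simp [this]
  have hmap : ((fun x : Int × T => x.2) ∘ fun o => (ov o, o)) = fun o => o := rfl
  simp only [hmap, List.map_id']
  simpa using this

-- ===== VERDICT (by name: the statement is the Claim_ definition above) =====
theorem find_related_spec : Claim_equal_find_related := by
  intro trace all_traces limit _ _
  show find_related trace all_traces limit = find_related_alt trace all_traces limit
  unfold find_related find_related_alt
  exact generic_equiv
    (fun other => (PySem.Dict.mk other).getD "slug" [] == (PySem.Dict.mk trace).getD "slug" [])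
    (fun other => PySem.Set.len (PySem.Set.inter
      (PySem.Set.ofList ((PySem.Dict.mk trace).getD "tags" []))
      (PySem.Set.ofList ((PySem.Dict.mk other).getD "tags" []))))
    (PySem.Set.len (PySem.Set.ofList ((PySem.Dict.mk trace).getD "tags" [])))
    (fun o => by
      simp only [PySem.Set.len, PySem.Set.inter]
      exact_mod_cast List.length_filter_le _ _)
    all_traces limit
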